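-- pv_equiv track=rewrite | github.com/ArchipelagoMW/Archipelago | worlds/pikmin2/__init__.py | item_name_id_mapping
-- ===== SOURCE A (Python) =====
-- def item_name_id_mapping(items):
--     item_dict = {}
--     modifier = 1
--     for item in items:
--         if (item[0] == "Brute Knuckles"):
--             modifier = 501
--         item_dict[item[0]] = item[2] + modifier
--     return item_dict
-- ===== SOURCE B (Python) =====
-- def item_name_id_mapping(items):
--     items = list(items)
--     latch = next((i for i, it in enumerate(items) if it[0] == "Brute Knuckles"), None)
--     return {it[0]: it[2] + (501 if latch is not None and i >= latch else 1)
--             for i, it in enumerate(items)}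
-- ===== Notes on version B (the rewrite author's own statement) =====
-- stated objective: alternative
-- what changed: Replaces the single stateful loop that latches a modifier variable mid-iteration by two stateless passes: first find the index of the first 'Brute Knuckles' item, then build the dict in one comprehension choosing +501 or +1 by index comparison.
import Mathlib
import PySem

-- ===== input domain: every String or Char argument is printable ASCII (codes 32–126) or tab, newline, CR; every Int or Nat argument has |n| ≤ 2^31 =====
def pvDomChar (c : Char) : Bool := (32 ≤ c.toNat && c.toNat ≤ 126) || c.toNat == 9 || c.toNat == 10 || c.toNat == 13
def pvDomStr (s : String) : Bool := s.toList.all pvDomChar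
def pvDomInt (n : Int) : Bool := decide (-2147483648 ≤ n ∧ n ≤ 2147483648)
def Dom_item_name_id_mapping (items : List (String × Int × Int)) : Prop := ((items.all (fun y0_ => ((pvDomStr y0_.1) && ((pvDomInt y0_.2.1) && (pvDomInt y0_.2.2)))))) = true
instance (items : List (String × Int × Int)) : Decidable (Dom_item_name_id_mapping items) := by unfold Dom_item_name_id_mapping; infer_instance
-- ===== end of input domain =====

-- B replaces A's stateful latched-modifier loop by an index precompute plus a stateless second pass (alternative decomposition, same cost).


-- ===== PORT A =====
-- A's loop: dict and latched modifier threaded through one pass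
def pvLoopA : List (String × Int × Int) → PySem.Dict String Int → Int → PySem.Dict String Int
  | [], d, _ => d
  | it :: rest, d, m =>
      let m' := if it.1 == "Brute Knuckles" then 501 else m
      pvLoopA rest (d.insert it.1 (it.2.2 + m')) m'

def item_name_id_mapping (items : List (String × Int × Int)) : List (String × Int) :=
  (pvLoopA items PySem.Dict.empty 1).items

-- ===== PORT B =====
-- B's second pass: dict built from enumerate, modifier chosen by index vs precomputed latch
def pvLoopB (latch : Option Int) : List (Int × (String × Int × Int)) → PySem.Dict String Int → PySem.Dict String Int
  | [], d => d
  | (i, it) :: rest, d =>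
      let m : Int := match latch with
        | some l => if l ≤ i then 501 else 1
        | none => 1
      pvLoopB latch rest (d.insert it.1 (it.2.2 + m))

def item_name_id_mapping_alt (items : List (String × Int × Int)) : List (String × Int) :=
  let latch : Option Int :=
    ((PySem.List.enumerate items).find? (fun p => p.2.1 == "Brute Knuckles")).map (·.1)
  (pvLoopB latch (PySem.List.enumerate items) PySem.Dict.empty).items

-- ===== PRECONDITION & SPEC =====
def Spec_item_name_id_mapping (items : List (String × Int × Int)) (out : List (String × Int)) : Prop := out = item_name_id_mapping_alt items
instance (items : List (String × Int × Int)) (out : List (String × Int)) : Decidable (Spec_item_name_id_mapping items out) := by unfold Spec_item_name_id_mapping; infer_instance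

-- ===== CLAIM (what is proved, stated in full; the proofs are below) =====
def Claim_equal_item_name_id_mapping : Prop := ∀ (items : List (String × Int × Int)), Dom_item_name_id_mapping items → Spec_item_name_id_mapping items (item_name_id_mapping items)

-- ===== LEMMAS AND PROOFS =====

-- once the latch is at or before the current index, B adds 501 everywhere, as A does once m = 501
theorem pvLoop_all501 (items : List (String × Int × Int)) :
    ∀ (d : PySem.Dict String Int) (l s : Int), l ≤ s →
      pvLoopB (some l) (PySem.List.enumerate items s) d = pvLoopA items d 501 := by
  induction items with
  | nil => intro d l s _; simp [PySem.List.enumerate_nil, pvLoopA, pvLoopB]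
  | cons it rest ih =>
      intro d l s hls
      rw [PySem.List.enumerate_cons]
      simp only [pvLoopA, pvLoopB, if_pos hls]
      have hm : (if it.1 == "Brute Knuckles" then (501 : Int) else 501) = 501 := by
        split <;> rfl
      rw [hm]
      exact ih _ l (s + 1) (by omega)

theorem find?_enumerate_fst_ge {α : Type} (p : Int × α → Bool) (xs : List α) (s : Int)
    (q : Int × α) (h : (PySem.List.enumerate xs s).find? p = some q) : s ≤ q.1 := by
  have hmem : q ∈ PySem.List.enumerate xs s := List.mem_of_find?_eq_some h
  rw [PySem.List.mem_enumerate_iff] at hmem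
  obtain ⟨k, hk, rfl⟩ := hmem
  simp only []
  omega

theorem pvLoop_main (items : List (String × Int × Int)) :
    ∀ (d : PySem.Dict String Int) (s : Int),
      pvLoopB (((PySem.List.enumerate items s).find? (fun p => p.2.1 == "Brute Knuckles")).map (·.1))
        (PySem.List.enumerate items s) d = pvLoopA items d 1 := by
  induction items with
  | nil => intro d s; simp [PySem.List.enumerate_nil, pvLoopA, pvLoopB]
  | cons it rest ih =>
      intro d s
      rw [PySem.List.enumerate_cons]
      by_cases h : it.1 = "Brute Knuckles"
      · have hp : (fun p : Int × (String × Int × Int) => p.2.1 == "Brute Knuckles") (s, it) = true := by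
          simp [h]
        rw [List.find?_cons_of_pos (p := fun p : Int × (String × Int × Int) => p.2.1 == "Brute Knuckles") hp]
        simp only [Option.map_some, pvLoopA, pvLoopB, if_pos (le_refl s), h]
        simp only [beq_self_eq_true, if_pos]
        exact pvLoop_all501 rest _ s (s + 1) (by omega)
      · have hp : (fun p : Int × (String × Int × Int) => p.2.1 == "Brute Knuckles") (s, it) = false := by
          simp [h]
        rw [List.find?_cons_of_neg (by simp [hp])]
        simp only [pvLoopA, pvLoopB]
        have hm : (match ((PySem.List.enumerate rest (s + 1)).find?
              (fun p => p.2.1 == "Brute Knuckles")).map (·.1) with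
            | some l => if l ≤ s then (501 : Int) else 1
            | none => 1) = 1 := by
          cases hf : (PySem.List.enumerate rest (s + 1)).find? (fun p => p.2.1 == "Brute Knuckles") with
          | none => simp
          | some q =>
              have := find?_enumerate_fst_ge _ rest (s + 1) q hf
              simp [if_neg (by omega : ¬ q.1 ≤ s)]
        rw [hm]
        have hb : (it.1 == "Brute Knuckles") = false := by simp [h]
        rw [hb]
        simp only [if_neg Bool.false_ne_true]
        exact ih _ (s + 1)

-- ===== VERDICT (by name: the statement is the Claim_ definition above) =====
theorem item_name_id_mapping_spec : Claim_equal_item_name_id_mapping := by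
  intro items _
  unfold Spec_item_name_id_mapping item_name_id_mapping item_name_id_mapping_alt
  exact congrArg PySem.Dict.items (pvLoop_main items PySem.Dict.empty 0).symm
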